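-- pv_equiv track=rewrite | github.com/elihaz1/SAST_Func | function.py | exclude_sensitive_files
-- ===== SOURCE A (Python) =====
-- def exclude_sensitive_files(diff: str) -> str:
--     lines = diff.splitlines()
--     result = []
--     skip = False
--     for line in lines:
--         if line.startswith('diff --git'):
--             filename = line.split(' ')[2].lstrip('b/')
--             skip = any(s in filename.lower() for s in [
--                 '.env', 'secret', 'config', '.pem', '.crt', '.key', 'credentials', 'settings'
--             ])
--         if not skip:
--             result.append(line)
--     return '\n'.join(result)
-- ===== SOURCE B (Python) =====
-- SENSITIVE = ['.env', 'secret', 'config', '.pem', '.crt', '.key', 'credentials', 'settings']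
--
--
-- def _is_sensitive(header):
--     filename = header.split(' ')[2].lstrip('b/')
--     fl = filename.lower()
--     return any(s in fl for s in SENSITIVE)
--
--
-- def exclude_sensitive_files(diff: str) -> str:
--     # Section-at-a-time: at each 'diff --git' header, find the end of the whole
--     # section and keep or drop it as a block; preamble lines are kept one by one.
--     lines = diff.splitlines()
--     n = len(lines)
--     out = []
--     i = 0
--     while i < n:
--         line = lines[i]
--         if line.startswith('diff --git'):
--             j = i + 1
--             while j < n and not lines[j].startswith('diff --git'):
--                 j += 1
--             if not _is_sensitive(line):
--                 out.extend(lines[i:j])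
--             i = j
--         else:
--             out.append(line)
--             i += 1
--     return '\n'.join(out)
-- ===== Notes on version B (the rewrite author's own statement) =====
-- stated objective: alternative
-- what changed: B splits the diff into whole sections (preamble, then one block per 'diff --git' header found by scanning ahead to the next header) and keeps or drops each section as a block, instead of A's single streaming pass that carries a skip flag across lines.
-- outside the precondition, e.g. on exclude_sensitive_files('diff --git'): A raises IndexError, B raises IndexError
import Mathlib
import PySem

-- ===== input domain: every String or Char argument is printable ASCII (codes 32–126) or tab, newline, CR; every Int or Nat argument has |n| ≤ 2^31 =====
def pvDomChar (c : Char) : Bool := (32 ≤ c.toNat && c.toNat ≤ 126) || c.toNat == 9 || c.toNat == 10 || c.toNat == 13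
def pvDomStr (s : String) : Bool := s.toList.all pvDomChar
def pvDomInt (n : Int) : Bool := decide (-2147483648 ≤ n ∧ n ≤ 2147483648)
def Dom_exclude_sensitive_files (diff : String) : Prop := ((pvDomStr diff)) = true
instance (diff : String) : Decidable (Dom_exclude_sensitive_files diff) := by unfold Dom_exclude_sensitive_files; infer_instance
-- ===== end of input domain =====

-- B keeps/drops whole diff sections as blocks (section-consuming recursion) instead of A's
-- streaming pass with a carried skip flag; alternative decomposition, same cost.


-- ===== PORT A =====
-- line.startswith('diff --git')
def pvHdr (line : String) : Bool := PySem.Str.startswith line "diff --git"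

-- s.lstrip('b/'): drops every leading char in {'b','/'} — exact port of str.lstrip with that char set
def pvLstripBSlash (s : String) : String :=
  String.ofList (s.toList.dropWhile (fun c => c == 'b' || c == '/'))

-- filename = line.split(' ')[2].lstrip('b/'); any(s in filename.lower() for s in [...])
-- (the [2] index uses getD "": Python raises IndexError there, excluded by Pre_)
def pvSensitive (line : String) : Bool :=
  let filename := pvLstripBSlash ((PySem.List.pyGet? ((PySem.Str.split? line " ").getD []) 2).getD "")
  [".env", "secret", "config", ".pem", ".crt", ".key", "credentials", "settings"].any
    (fun s => PySem.Str.isIn s (PySem.Str.lower filename))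

def exclude_sensitive_files (diff : String) : String :=
  let lines := PySem.Str.splitlines diff
  let st := lines.foldl
    (fun (st : List String × Bool) line =>
      let skip := if pvHdr line then pvSensitive line else st.2
      (if skip then st.1 else st.1 ++ [line], skip))
    ([], false)
  PySem.Str.join "\n" st.1

-- ===== PORT B =====
-- one call per preamble line or per whole section: at a header, take the body up to the
-- next header and keep/drop the block as one
def pvKeep : List String → List String
  | [] => []
  | line :: rest =>
    if pvHdr line then
      (if pvSensitive line then [] else line :: rest.takeWhile (fun l => !pvHdr l))
        ++ pvKeep (rest.dropWhile (fun l => !pvHdr l))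
    else
      line :: pvKeep rest
termination_by xs => xs.length
decreasing_by
  · exact Nat.lt_succ_of_le (List.length_dropWhile_le _ _)
  · simp

def exclude_sensitive_files_alt (diff : String) : String :=
  PySem.Str.join "\n" (pvKeep (PySem.Str.splitlines diff))

-- ===== PRECONDITION & SPEC =====
-- Pre_ excludes exactly the inputs where A raises IndexError: a line starting with
-- 'diff --git' whose space-split has fewer than 3 parts.
def Pre_exclude_sensitive_files (diff : String) : Prop :=
  ∀ line ∈ PySem.Str.splitlines diff, pvHdr line = true → 3 ≤ ((PySem.Str.split? line " ").getD []).length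
instance (diff : String) : Decidable (Pre_exclude_sensitive_files diff) := by
  unfold Pre_exclude_sensitive_files; infer_instance

def pvWitness_exclude_sensitive_files : String := "hello\ndiff --git a/x.env b/x.env\n+1\ndiff --git a/ok.py b/ok.py\n+2"

def Spec_exclude_sensitive_files (diff : String) (out : String) : Prop := out = exclude_sensitive_files_alt diff
instance (diff : String) (out : String) : Decidable (Spec_exclude_sensitive_files diff out) := by unfold Spec_exclude_sensitive_files; infer_instance

-- ===== CLAIM (what is proved, stated in full; the proofs are below) =====
def Claim_equal_exclude_sensitive_files : Prop := ∀ (diff : String), Dom_exclude_sensitive_files diff → Pre_exclude_sensitive_files diff → Spec_exclude_sensitive_files diff (exclude_sensitive_files diff)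

-- ===== LEMMAS AND PROOFS =====

-- B keeps a non-header preamble line by line, so pvKeep factors through takeWhile/dropWhile
theorem pvKeep_pre (xs : List String) :
    pvKeep xs = xs.takeWhile (fun l => !pvHdr l) ++ pvKeep (xs.dropWhile (fun l => !pvHdr l)) := by
  induction xs with
  | nil => simp [pvKeep]
  | cons x rest ih =>
    by_cases h : pvHdr x = true
    · simp [h]
    · rw [pvKeep.eq_def]
      simp only [List.takeWhile_cons, List.dropWhile_cons, h, Bool.not_false,
        Bool.false_eq_true, if_false, if_true]
      simp [ih]

-- A's fold with a carried skip flag equals B's section recursion (skip = true ⇒ the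
-- current section's remaining body is dropped first)
theorem foldA_eq (lines : List String) : ∀ (acc : List String) (skip : Bool),
    (lines.foldl
      (fun (st : List String × Bool) line =>
        let skip := if pvHdr line then pvSensitive line else st.2
        (if skip then st.1 else st.1 ++ [line], skip))
      (acc, skip)).1
    = acc ++ pvKeep (if skip then lines.dropWhile (fun l => !pvHdr l) else lines) := by
  induction lines with
  | nil => intro acc skip; cases skip <;> simp [pvKeep]
  | cons line rest ih =>
    intro acc skip
    by_cases h : pvHdr line = true
    · have hd : (if skip then List.dropWhile (fun l => !pvHdr l) (line :: rest)
          else line :: rest) = line :: rest := by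
        cases skip <;> simp [h]
      rw [hd, pvKeep.eq_def]
      by_cases hs : pvSensitive line = true
      · simp only [List.foldl_cons, h, hs, if_true]
        simpa using ih acc true
      · simp only [List.foldl_cons, h, hs, if_true, if_false, Bool.false_eq_true]
        simp only [ih, Bool.false_eq_true, if_false]
        rw [pvKeep_pre rest]
        simp
    · cases skip
      · simp only [List.foldl_cons, h, if_false, Bool.false_eq_true]
        rw [ih]
        conv_rhs => rw [pvKeep.eq_def]
        simp [h]
      · simp only [List.foldl_cons, h, if_true]
        rw [ih]
        simp [h]

-- ===== VERDICT (by name: the statement is the Claim_ definition above) =====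
theorem exclude_sensitive_files_spec : Claim_equal_exclude_sensitive_files := by
  intro diff _ _
  have h := foldA_eq (PySem.Str.splitlines diff) [] false
  simp only [Bool.false_eq_true, if_false, List.nil_append] at h
  unfold Spec_exclude_sensitive_files exclude_sensitive_files exclude_sensitive_files_alt
  simp only []
  rw [h]
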